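-- pv_equiv track=rewrite | github.com/SUNET/transcribe-worker | utils/whisper.py | __caption_split_smart
-- ===== SOURCE A (Python) =====
-- def __caption_split_smart(caption: str) -> str:
--     """
--     Intelligently split captions at natural break points.
--     """
--
--     max_line_length = 42
--
--     if len(caption) <= max_line_length:
--         return caption
--
--     mid_point = len(caption) // 2
--     search_range = 15
--
--     for offset in range(search_range):
--         for pos in [mid_point + offset, mid_point - offset]:
--             if 0 < pos < len(caption):
--                 char = caption[pos]
--
--                 if char in ",.;:!?-":
--                     first_line = caption[:pos + 1].strip()
--                     second_line = caption[pos + 1:].strip()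
--                     return f"{first_line}\n{second_line}"
--
--     pos = mid_point
--
--     while pos > 0 and caption[pos] != " ":
--         pos -= 1
--
--     if pos == 0:
--         pos = mid_point
--
--     first_line = caption[:pos].strip()
--     second_line = caption[pos:].strip()
--
--     return f"{first_line}\n{second_line}"
-- ===== SOURCE B (Python) =====
-- def __caption_split_smart(caption: str) -> str:
--     """
--     Intelligently split captions at natural break points.
--     """
--     if len(caption) <= 42:
--         return caption
--
--     mid = len(caption) // 2
--     punct = ",.;:!?-"
--
--     right = next((mid + o for o in range(15) if caption[mid + o] in punct), None)
--     left = next((mid - o for o in range(1, 15) if caption[mid - o] in punct), None)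
--
--     if right is not None and (left is None or right - mid <= mid - left):
--         cut = right + 1
--     elif left is not None:
--         cut = left + 1
--     else:
--         spaces = [p for p in range(1, mid + 1) if caption[p] == " "]
--         cut = spaces[-1] if spaces else mid
--
--     return f"{caption[:cut].strip()}\n{caption[cut:].strip()}"
-- ===== Notes on version B (the rewrite author's own statement) =====
-- stated objective: simpler
-- what changed: A's interleaved outward ping-pong search with early return (and its descending while-loop space fallback) is replaced by two independent directional scans whose first hits are compared once with a tie-to-the-right rule, and the fallback by taking the last element of a list of space positions up to mid; the always-true bounds check inside the search loop is dropped.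
import Mathlib
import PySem

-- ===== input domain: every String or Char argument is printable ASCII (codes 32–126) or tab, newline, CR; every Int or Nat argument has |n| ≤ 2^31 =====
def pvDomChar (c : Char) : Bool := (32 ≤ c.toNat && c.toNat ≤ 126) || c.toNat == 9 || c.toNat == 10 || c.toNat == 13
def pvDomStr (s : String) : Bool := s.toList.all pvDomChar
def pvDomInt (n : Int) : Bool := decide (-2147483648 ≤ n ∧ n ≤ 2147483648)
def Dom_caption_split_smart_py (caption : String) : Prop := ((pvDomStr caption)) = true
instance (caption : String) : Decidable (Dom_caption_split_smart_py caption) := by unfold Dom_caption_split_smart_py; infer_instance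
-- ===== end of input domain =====

-- B replaces A's interleaved outward ping-pong search (and its descending while-loop fallback) by two
-- independent directional scans compared once, and a last-space list comprehension; objective: simpler.

-- ===== PORT A =====
-- `char in ",.;:!?-"` on a single char is ported as char membership in the literal's char list (exact for 1-char strings).
def tryPosA (l : List Char) (n pos : Int) : Option Int :=
  if 0 < pos ∧ pos < n then
    match PySem.List.pyGet? l pos with
    | some c => if ",.;:!?-".toList.contains c then some pos else none
    | none => none
  else none

-- 'for offset in range(15): for pos in [mid+offset, mid-offset]: …' with early return
def searchA (l : List Char) (n m : Int) : List Int → Option Int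
  | [] => none
  | off :: rest =>
    match tryPosA l n (m + off) with
    | some p => some p
    | none =>
      match tryPosA l n (m - off) with
      | some p => some p
      | none => searchA l n m rest

-- 'while pos > 0 and caption[pos] != " ": pos -= 1' (pos starts at mid ≥ 0, so Nat recursion; in-range index read via pyGetD)
def wdownA (l : List Char) : Nat → Nat
  | 0 => 0
  | p + 1 => if PySem.List.pyGetD l ((p : Int) + 1) ' ' ≠ ' ' then wdownA l p else p + 1

def caption_split_smart_py (caption : String) : String :=
  let l := caption.toList
  let n : Int := PySem.Chars.len l
  if n ≤ 42 then caption
  else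
    let m := PySem.Int.floordiv n 2
    match searchA l n m (PySem.List.pyRange 0 15) with
    | some pos =>
      String.ofList (PySem.Chars.strip (PySem.List.slice l none (some (pos + 1))) ++
        '\n' :: PySem.Chars.strip (PySem.List.slice l (some (pos + 1)) none))
    | none =>
      let w := wdownA l m.toNat
      let pos : Int := if w = 0 then m else (w : Int)
      String.ofList (PySem.Chars.strip (PySem.List.slice l none (some pos)) ++
        '\n' :: PySem.Chars.strip (PySem.List.slice l (some pos) none))

-- ===== PORT B =====
def caption_split_smart_py_alt (caption : String) : String :=
  let l := caption.toList
  let n : Int := PySem.Chars.len l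
  if n ≤ 42 then caption
  else
    let m := PySem.Int.floordiv n 2
    let right := ((PySem.List.pyRange 0 15).find?
      (fun o => ",.;:!?-".toList.contains (PySem.List.pyGetD l (m + o) ' '))).map (fun o => m + o)
    let left := ((PySem.List.pyRange 1 15).find?
      (fun o => ",.;:!?-".toList.contains (PySem.List.pyGetD l (m - o) ' '))).map (fun o => m - o)
    let cut : Int :=
      match right, left with
      | some r, some lf => if r - m ≤ m - lf then r + 1 else lf + 1
      | some r, none => r + 1
      | none, some lf => lf + 1
      | none, none =>
        let spaces := (PySem.List.pyRange 1 (m + 1)).filter (fun p => PySem.List.pyGetD l p ' ' == ' ')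
        match PySem.List.pyGet? spaces (-1) with
        | some p => p
        | none => m
    String.ofList (PySem.Chars.strip (PySem.List.slice l none (some cut)) ++
      '\n' :: PySem.Chars.strip (PySem.List.slice l (some cut) none))

-- ===== PRECONDITION & SPEC =====
def Spec_caption_split_smart_py (caption : String) (out : String) : Prop := out = caption_split_smart_py_alt caption
instance (caption : String) (out : String) : Decidable (Spec_caption_split_smart_py caption out) := by unfold Spec_caption_split_smart_py; infer_instance

-- ===== CLAIM (what is proved, stated in full; the proofs are below) =====
def Claim_equal_caption_split_smart_py : Prop := ∀ (caption : String), Dom_caption_split_smart_py caption → Spec_caption_split_smart_py caption (caption_split_smart_py caption)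

-- ===== LEMMAS AND PROOFS =====

-- the bounds-and-punctuation test A applies at a position
def QfA (l : List Char) (n p : Int) : Bool :=
  decide (0 < p) && decide (p < n) && ",.;:!?-".toList.contains (PySem.List.pyGetD l p ' ')

-- how A's interleaved search combines the first right hit (offset a) and first left hit (offset b)
def combineRL (m : Int) : Option Int → Option Int → Option Int
  | some a, some b => if a ≤ b then some (m + a) else some (m - b)
  | some a, none => some (m + a)
  | none, some b => some (m - b)
  | none, none => none

theorem tryPosA_eq (l : List Char) (n pos : Int) (hn : n = (l.length : Int)) :
    tryPosA l n pos = if QfA l n pos then some pos else none := by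
  unfold tryPosA QfA
  by_cases h0 : 0 < pos
  · by_cases h1 : pos < n
    · rw [PySem.List.pyGet?_eq_some_getElem l (by omega) (by omega : pos < (l.length : Int))]
      rw [PySem.List.pyGetD_eq_getElem l ' ' (by omega) (by omega : pos < (l.length : Int))]
      simp [h0, h1]
    · simp [h0, h1]
  · simp [h0]

theorem find?_congr' {α : Type} (xs : List α) (p q : α → Bool)
    (h : ∀ x ∈ xs, p x = q x) : xs.find? p = xs.find? q := by
  induction xs with
  | nil => rfl
  | cons x xs ih =>
    simp only [List.find?_cons]
    rw [h x (by simp)]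
    cases q x
    · exact ih fun y hy => h y (by simp [hy])
    · rfl

theorem searchA_eq (l : List Char) (n m : Int) (hn : n = (l.length : Int)) :
    ∀ offs : List Int, offs.Pairwise (· < ·) →
      searchA l n m offs =
        combineRL m (offs.find? fun o => QfA l n (m + o)) (offs.find? fun o => QfA l n (m - o)) := by
  intro offs hp
  induction offs with
  | nil => rfl
  | cons off rest ih =>
    have hp' := (List.pairwise_cons.mp hp).2
    have hlt : ∀ x ∈ rest, off < x := (List.pairwise_cons.mp hp).1
    simp only [searchA, List.find?_cons, tryPosA_eq l n _ hn]
    by_cases hR : QfA l n (m + off)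
    · simp only [hR, if_true]
      by_cases hL : QfA l n (m - off)
      · simp [hL, combineRL]
      · simp only [hL]
        cases hfl : rest.find? (fun o => QfA l n (m - o)) with
        | none => simp [combineRL]
        | some b =>
          have hb : b ∈ rest := List.mem_of_find?_eq_some hfl
          have : off ≤ b := le_of_lt (hlt b hb)
          simp [combineRL, this]
    · simp only [hR, Bool.false_eq_true, if_false]
      by_cases hL : QfA l n (m - off)
      · simp only [hL, if_true]
        cases hfr : rest.find? (fun o => QfA l n (m + o)) with
        | none => simp [combineRL]
        | some a =>
          have ha : a ∈ rest := List.mem_of_find?_eq_some hfr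
          have : ¬ (a ≤ off) := not_le.mpr (hlt a ha)
          simp [combineRL, this]
      · simp only [hL]
        exact ih hp'

theorem wdownA_eq (l : List Char) (k : Nat) :
    ((PySem.List.pyRange 1 ((k : Int) + 1)).filter (fun p => PySem.List.pyGetD l p ' ' == ' ')).getLast?
      = if wdownA l k = 0 then none else some ((wdownA l k : Int)) := by
  induction k with
  | zero =>
    rw [PySem.List.pyRange_one_eq_nil (by omega)]
    simp [wdownA]
  | succ p ih =>
    push_cast
    rw [PySem.List.pyRange_one_succ_right (by omega)]
    rw [List.filter_append, List.getLast?_append]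
    simp only [List.filter_cons, List.filter_nil]
    by_cases hs : PySem.List.pyGetD l ((p : Int) + 1) ' ' = ' '
    · simp [wdownA, hs]
    · have : (PySem.List.pyGetD l ((p : Int) + 1) ' ' == ' ') = false := by
        simp [hs]
      simp only [this, Bool.false_eq_true, if_false, List.getLast?_nil, Option.none_or]
      simp only [wdownA, if_pos (by simpa using hs)]
      exact ih

theorem caption_split_smart_py_eq (caption : String) :
    caption_split_smart_py caption = caption_split_smart_py_alt caption := by
  unfold caption_split_smart_py caption_split_smart_py_alt
  set l := caption.toList with hl
  have hn : PySem.Chars.len l = (l.length : Int) := by simp [PySem.Chars.len_eq]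
  by_cases h42 : PySem.Chars.len l ≤ 42
  · rw [if_pos h42, if_pos h42]
  · rw [if_neg h42, if_neg h42]
    dsimp only
    set n := PySem.Chars.len l with hndef
    set m := PySem.Int.floordiv n 2 with hm
    have hmb : m * 2 ≤ n ∧ n < (m + 1) * 2 :=
      (PySem.Int.floordiv_eq_iff_of_pos (by omega)).mp rfl
    have hn43 : 43 ≤ n := by omega
    have hm21 : 21 ≤ m := by omega
    have hmlt : m + 14 < n := by omega
    -- on the search window the bounds test of A is vacuous
    have hcongR : ∀ o ∈ PySem.List.pyRange 0 15,
        QfA l n (m + o) = ",.;:!?-".toList.contains (PySem.List.pyGetD l (m + o) ' ') := by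
      intro o ho
      have hb := PySem.List.mem_pyRange_one.mp ho
      unfold QfA
      rw [decide_eq_true (by omega : (0 : Int) < m + o),
        decide_eq_true (by omega : m + o < n)]
      simp only [Bool.true_and]
    have hcongL : ∀ o ∈ PySem.List.pyRange 0 15,
        QfA l n (m - o) = ",.;:!?-".toList.contains (PySem.List.pyGetD l (m - o) ' ') := by
      intro o ho
      have hb := PySem.List.mem_pyRange_one.mp ho
      unfold QfA
      rw [decide_eq_true (by omega : (0 : Int) < m - o),
        decide_eq_true (by omega : m - o < n)]
      simp only [Bool.true_and]
    rw [searchA_eq l n m hn _ (PySem.List.pairwise_lt_pyRange_one 0 15)]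
    rw [find?_congr' _ _ _ hcongR, find?_congr' _ _ _ hcongL]
    have hsplit : PySem.List.pyRange (0 : Int) 15 = 0 :: PySem.List.pyRange 1 15 :=
      PySem.List.pyRange_one_cons (by omega)
    rw [hsplit]
    simp only [List.find?_cons, add_zero, sub_zero]
    -- the fallback cut positions agree
    have hfall :
        (if wdownA l m.toNat = 0 then m else ((wdownA l m.toNat : Nat) : Int)) =
        (match PySem.List.pyGet?
            ((PySem.List.pyRange 1 (m + 1)).filter (fun p => PySem.List.pyGetD l p ' ' == ' ')) (-1) with
          | some p => p
          | none => m) := by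
      rw [PySem.List.pyGet?_neg_one]
      have hcast : m = ((m.toNat : Nat) : Int) := by omega
      rw [show m + 1 = ((m.toNat : Nat) : Int) + 1 by omega]
      rw [wdownA_eq l m.toNat]
      by_cases hw : wdownA l m.toNat = 0
      · simp [hw]
      · simp [hw]
    by_cases hPm : ",.;:!?-".toList.contains (PySem.List.pyGetD l (m + 0) ' ')
    · -- caption[mid] is punctuation: both split right after mid
      have hPm' : (",.;:!?-".toList.contains (PySem.List.pyGetD l m ' ')) = true := by
        simpa using hPm
      simp only [show m + 0 = m by ring, hPm', combineRL, Option.map_some]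
      cases hfl : (PySem.List.pyRange (1 : Int) 15).find?
          (fun o => ",.;:!?-".toList.contains (PySem.List.pyGetD l (m - o) ' ')) with
      | none => simp
      | some b =>
        have hb := PySem.List.mem_pyRange_one.mp (List.mem_of_find?_eq_some hfl)
        simp only [le_refl, if_true, Option.map_some]
        rw [show m - m = (0 : Int) by ring, show m - (m - b) = b by ring]
        rw [if_pos (by omega : (0 : Int) ≤ b)]
    · have hPm0 : (",.;:!?-".toList.contains (PySem.List.pyGetD l m ' ')) = false := by
        simpa using hPm
      simp only [hPm0]
      cases hfr : (PySem.List.pyRange (1 : Int) 15).find?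
          (fun o => ",.;:!?-".toList.contains (PySem.List.pyGetD l (m + o) ' ')) with
      | none =>
        cases hfl : (PySem.List.pyRange (1 : Int) 15).find?
            (fun o => ",.;:!?-".toList.contains (PySem.List.pyGetD l (m - o) ' ')) with
        | none => simp only [combineRL, Option.map_none]; rw [hfall]
        | some b => simp [combineRL]
      | some a =>
        cases hfl : (PySem.List.pyRange (1 : Int) 15).find?
            (fun o => ",.;:!?-".toList.contains (PySem.List.pyGetD l (m - o) ' ')) with
        | none => simp [combineRL]
        | some b =>
          simp only [combineRL, Option.map_some]
          rw [show m + a - m = a by ring, show m - (m - b) = b by ring]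
          by_cases hab : a ≤ b
          · simp [hab]
          · simp [hab]

-- ===== VERDICT (by name: the statement is the Claim_ definition above) =====
theorem caption_split_smart_py_spec : Claim_equal_caption_split_smart_py := by
  intro caption _
  unfold Spec_caption_split_smart_py
  exact caption_split_smart_py_eq caption
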